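-- pv_equiv track=rewrite | github.com/flauschzelle/cli-wordle | cli_wordle.py | color_code_hints
-- ===== SOURCE A (Python) =====
-- BG_GREEN = '\033[42m'
--
-- BG_YELLOW = '\033[43m'
--
-- BG_GRAY = '\033[100m'
--
-- END = '\033[0m'
--
-- BOLD = '\033[1m'
--
-- def bold_colored_letter(letter: str, color: str) -> str:
--     """
--     Apply bold, spacing and color to the given letter.
--
--     :param letter: the text to be formatted
--     :param color: background or text color (ANSI code)
--     :return:
--     """
--     ctext: str = f"{BOLD}{color} {letter} {END}"
--     return ctext
--
-- def color_code_hints(text: str, pattern: str) -> str: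
--     """
--     Apply hint colors to the given word.
--
--     :param text: the text to be colored
--     :param pattern: the solution to derive the hints from
--     :return: the given word in bold, spaced text with hint colors
--     """
--     ctext: str = ""
--     hidden: list = []
--
--     for i in range(len(pattern)):
--         if text[i] != pattern[i]:
--             hidden.append(pattern[i])
--
--     for i in range(len(pattern)):
--         if text[i] == pattern[i]:
--             ctext += bold_colored_letter(text[i], BG_GREEN)
--         elif text[i] in hidden:
--             ctext += bold_colored_letter(text[i], BG_YELLOW)
--             hidden.remove(text[i])
--         else:
--             ctext += bold_colored_letter(text[i], BG_GRAY)
--     return ctext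
-- ===== SOURCE B (Python) =====
-- BG_GREEN = '\033[42m'
-- BG_YELLOW = '\033[43m'
-- BG_GRAY = '\033[100m'
-- END = '\033[0m'
-- BOLD = '\033[1m'
--
--
-- def bold_colored_letter(letter: str, color: str) -> str:
--     return f"{BOLD}{color} {letter} {END}"
--
--
-- def color_code_hints(text: str, pattern: str) -> str:
--     # Batch algorithm: instead of streaming through the word while consuming
--     # letters from a pool, compute the set of yellow positions up front --
--     # group the mismatch positions by letter and, for each letter, the first
--     # quota(c) occurrences (quota(c) = number of unmatched pattern slots
--     # holding c) are yellow -- then render every position independently.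
--     n = len(pattern)
--     misses = [i for i in range(n) if text[i] != pattern[i]]
--     occ: dict = {}
--     for i in misses:
--         occ.setdefault(text[i], []).append(i)
--     quota: dict = {}
--     for i in misses:
--         quota[pattern[i]] = quota.get(pattern[i], 0) + 1
--     yellow = {i for c, idxs in occ.items() for i in idxs[:quota.get(c, 0)]}
--     return "".join(
--         bold_colored_letter(text[i],
--                             BG_GREEN if text[i] == pattern[i]
--                             else (BG_YELLOW if i in yellow else BG_GRAY))
--         for i in range(n))
-- ===== Notes on version B (the rewrite author's own statement) =====
-- stated objective: alternative
-- what changed: B computes the set of yellow positions in bulk -- grouping mismatch positions by letter and taking the first quota(c) occurrences of each letter -- and then renders every position independently, instead of A's left-to-right streaming pass that consumes letters from a 'hidden' pool with linear membership tests and removes.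
import Mathlib
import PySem

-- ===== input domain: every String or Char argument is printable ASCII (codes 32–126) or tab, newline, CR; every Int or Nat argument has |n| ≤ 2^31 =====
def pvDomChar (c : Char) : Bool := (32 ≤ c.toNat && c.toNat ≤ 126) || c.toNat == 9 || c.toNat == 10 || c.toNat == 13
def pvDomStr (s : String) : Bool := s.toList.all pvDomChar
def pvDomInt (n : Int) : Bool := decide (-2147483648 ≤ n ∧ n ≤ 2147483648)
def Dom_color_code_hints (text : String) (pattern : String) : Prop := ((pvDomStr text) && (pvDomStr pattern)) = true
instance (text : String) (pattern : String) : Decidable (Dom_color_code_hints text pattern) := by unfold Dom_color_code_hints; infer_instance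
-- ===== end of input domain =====

-- B computes the set of yellow positions in bulk (grouping mismatch positions by letter and
-- taking the first quota(c) occurrences of each letter) and renders positions independently,
-- instead of A's streaming pass consuming letters from a 'hidden' pool.
-- Pre_ excludes inputs where text is shorter than pattern (Python A raises IndexError there).

-- ===== PORT A =====
def pvBOLD : List Char := ['\x1b', '[', '1', 'm']
def pvGREEN : List Char := ['\x1b', '[', '4', '2', 'm']
def pvYELLOW : List Char := ['\x1b', '[', '4', '3', 'm']
def pvGRAY : List Char := ['\x1b', '[', '1', '0', '0', 'm']
def pvEND : List Char := ['\x1b', '[', '0', 'm']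

def bold_colored_letter_port (letter : List Char) (color : List Char) : List Char :=
  pvBOLD ++ color ++ [' '] ++ letter ++ [' '] ++ pvEND

-- t.getD i ' ' is exact for Python's t[i] here: Pre_ guarantees i < t.length on every access
-- (Python raises IndexError otherwise, excluded by Pre_).
-- hidden.remove(c) under the guard 'c in hidden' is List.erase (first occurrence).
def color_code_hints (text : String) (pattern : String) : String :=
  let t := text.toList
  let p := pattern.toList
  let hidden : List Char :=
    (List.range p.length).foldl
      (fun h i => if t.getD i ' ' ≠ p.getD i ' ' then h ++ [p.getD i ' '] else h) []
  String.ofList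
    ((List.range p.length).foldl
      (fun (st : List Char × List Char) i =>
        let c := t.getD i ' '
        if c = p.getD i ' ' then (st.1 ++ bold_colored_letter_port [c] pvGREEN, st.2)
        else if c ∈ st.2 then (st.1 ++ bold_colored_letter_port [c] pvYELLOW, st.2.erase c)
        else (st.1 ++ bold_colored_letter_port [c] pvGRAY, st.2))
      ([], hidden)).1

-- ===== PORT B =====
-- idxs[:k] with k = quota.get(c, 0) ≥ 0 is List.take k (exact for a nonnegative slice bound);
-- the Python set of ints is a PySem.Set Nat, used only for membership tests.
def color_code_hints_alt (text : String) (pattern : String) : String :=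
  let t := text.toList
  let p := pattern.toList
  let n := p.length
  let misses : List Nat := (List.range n).filter (fun i => t.getD i ' ' ≠ p.getD i ' ')
  let occ : PySem.Dict Char (List Nat) :=
    misses.foldl
      (fun d i => d.insert (t.getD i ' ') (d.getD (t.getD i ' ') [] ++ [i])) PySem.Dict.empty
  let quota : PySem.Dict Char Int :=
    misses.foldl
      (fun d i => d.insert (p.getD i ' ') (d.getD (p.getD i ' ') 0 + 1)) PySem.Dict.empty
  let yellow : PySem.Set Nat :=
    PySem.Set.ofList (occ.items.flatMap (fun ci => ci.2.take (quota.getD ci.1 0).toNat))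
  String.ofList
    ((List.range n).flatMap (fun i =>
      bold_colored_letter_port [t.getD i ' ']
        (if t.getD i ' ' = p.getD i ' ' then pvGREEN
         else if i ∈ yellow then pvYELLOW else pvGRAY)))

-- ===== PRECONDITION & SPEC =====
-- Pre_ excludes exactly the inputs where Python A raises IndexError (text shorter than pattern).
def Pre_color_code_hints (text : String) (pattern : String) : Prop :=
  pattern.toList.length ≤ text.toList.length
instance (text : String) (pattern : String) : Decidable (Pre_color_code_hints text pattern) := by
  unfold Pre_color_code_hints; infer_instance

def pvWitness_color_code_hints : String × String := ("crane", "canes")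

def Spec_color_code_hints (text : String) (pattern : String) (out : String) : Prop := out = color_code_hints_alt text pattern
instance (text : String) (pattern : String) (out : String) : Decidable (Spec_color_code_hints text pattern out) := by unfold Spec_color_code_hints; infer_instance

-- ===== CLAIM (what is proved, stated in full; the proofs are below) =====
def Claim_equal_color_code_hints : Prop := ∀ (text : String) (pattern : String), Dom_color_code_hints text pattern → Pre_color_code_hints text pattern → Spec_color_code_hints text pattern (color_code_hints text pattern)

-- ===== LEMMAS AND PROOFS =====

-- Common characterisation both ports are reduced to.
def pvMisses (t p : List Char) : List Nat :=
  (List.range p.length).filter (fun i => t.getD i ' ' ≠ p.getD i ' ')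

def pvOcc (t p : List Char) (c : Char) : List Nat :=
  (pvMisses t p).filter (fun i => t.getD i ' ' = c)

def pvQuota (t p : List Char) (c : Char) : Nat :=
  ((pvMisses t p).filter (fun i => p.getD i ' ' = c)).length

def pvRank (t p : List Char) (c : Char) (k : Nat) : Nat :=
  ((pvOcc t p c).filter (fun j => j < k)).length

def pvRender (t p : List Char) (i : Nat) : List Char :=
  bold_colored_letter_port [t.getD i ' ']
    (if t.getD i ' ' = p.getD i ' ' then pvGREEN
     else if pvRank t p (t.getD i ' ') i < pvQuota t p (t.getD i ' ') then pvYELLOW else pvGRAY)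

-- membership in a Nodup list seen through a '< k+1' filter
lemma pv_filter_lt_succ (l : List Nat) (k : Nat) (hnd : l.Nodup) :
    (l.filter (fun j => j < k + 1)).length
      = (l.filter (fun j => j < k)).length + (if k ∈ l then 1 else 0) := by
  induction l with
  | nil => simp
  | cons a l ih =>
    rcases List.nodup_cons.mp hnd with ⟨ha, hl⟩
    rw [List.filter_cons, List.filter_cons]
    by_cases hak : a = k
    · subst hak
      rw [if_pos (by simp : decide (a < a + 1) = true),
          if_neg (by simp : ¬ decide (a < a) = true),
          if_pos (List.mem_cons_self), List.length_cons, ih hl, if_neg ha]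
    · have hmem : (if k ∈ a :: l then 1 else 0) = (if k ∈ l then 1 else 0) := by
        have : (k ∈ a :: l) ↔ (k ∈ l) := by
          rw [List.mem_cons]
          exact or_iff_right (fun e => hak e.symm)
        rw [if_congr this rfl rfl]
      rw [hmem]
      by_cases hlt : a < k
      · rw [if_pos (by simp; omega : decide (a < k + 1) = true),
            if_pos (by simpa using hlt), List.length_cons, List.length_cons, ih hl]
        omega
      · rw [if_neg (by simp; omega : ¬ decide (a < k + 1) = true),
            if_neg (by simpa using hlt), ih hl]

lemma pv_nodup_misses (t p : List Char) : (pvMisses t p).Nodup :=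
  (List.nodup_range).filter _

lemma pv_nodup_occ (t p : List Char) (c : Char) : (pvOcc t p c).Nodup :=
  (pv_nodup_misses t p).filter _

lemma pv_rank_succ (t p : List Char) (c : Char) (k : Nat) :
    pvRank t p c (k + 1) = pvRank t p c k + (if k ∈ pvOcc t p c then 1 else 0) := by
  unfold pvRank
  exact pv_filter_lt_succ _ _ (pv_nodup_occ t p c)

lemma pv_mem_occ (t p : List Char) (i : Nat) :
    i ∈ pvOcc t p (t.getD i ' ') ↔ i < p.length ∧ t.getD i ' ' ≠ p.getD i ' ' := by
  unfold pvOcc pvMisses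
  simp [List.mem_filter, List.mem_range]

lemma pv_mem_occ' (t p : List Char) (c : Char) (i : Nat) :
    i ∈ pvOcc t p c ↔ i < p.length ∧ t.getD i ' ' ≠ p.getD i ' ' ∧ t.getD i ' ' = c := by
  unfold pvOcc pvMisses
  simp only [List.mem_filter, List.mem_range, decide_eq_true_eq, decide_not, Bool.not_eq_eq_eq_not,
    Bool.not_true, decide_eq_false_iff_not]
  tauto

-- ============ A side ============

-- A's 'hidden' list counts the unmatched pattern letters.
lemma pv_hidden_count (t p : List Char) (c : Char) :
    (((List.range p.length).foldl
        (fun h i => if t.getD i ' ' ≠ p.getD i ' ' then h ++ [p.getD i ' '] else h)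
        ([] : List Char)).count c) = pvQuota t p c := by
  have h := PySem.List.foldl_append_if (p := fun i => decide (t.getD i ' ' ≠ p.getD i ' '))
      (f := fun i => p.getD i ' ') (l := List.range p.length) (acc := ([] : List Char))
  simp only [decide_eq_true_eq] at h
  unfold pvQuota pvMisses
  rw [h, List.nil_append, List.count, List.countP_map, ← List.countP_eq_length_filter]
  apply List.countP_congr
  intro i _
  simp

-- The streaming loop of A renders exactly pvRender, given the pool-count invariant.
lemma pv_A_loop (t p : List Char) :
    ∀ (m k : Nat) (acc : List Char) (h : List Char),
      k + m ≤ p.length →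
      (∀ c, h.count c + min (pvQuota t p c) (pvRank t p c k) = pvQuota t p c) →
      ((List.range' k m).foldl
        (fun (st : List Char × List Char) i =>
          let c := t.getD i ' '
          if c = p.getD i ' ' then (st.1 ++ bold_colored_letter_port [c] pvGREEN, st.2)
          else if c ∈ st.2 then (st.1 ++ bold_colored_letter_port [c] pvYELLOW, st.2.erase c)
          else (st.1 ++ bold_colored_letter_port [c] pvGRAY, st.2))
        (acc, h)).1 = acc ++ (List.range' k m).flatMap (pvRender t p) := by
  intro m
  induction m with
  | zero => intro k acc h _ _; simp
  | succ m ih =>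
    intro k acc h hkm hinv
    rw [List.range'_succ]
    simp only [List.foldl_cons, List.flatMap_cons]
    set c := t.getD k ' ' with hc
    have hnotin : ∀ c' : Char, c' ≠ c → k ∉ pvOcc t p c' := by
      intro c' hcc hmem
      have h2 := ((pv_mem_occ' t p c' k).mp hmem).2.2
      exact hcc (by rw [← h2, ← hc])
    by_cases hg : c = p.getD k ' '
    · -- green: pool and ranks unchanged
      have hno : k ∉ pvOcc t p c := by
        rw [hc] at *
        intro hmem
        exact ((pv_mem_occ t p k).mp hmem).2 hg
      have hr : pvRender t p k = bold_colored_letter_port [c] pvGREEN := by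
        unfold pvRender
        rw [← hc, if_pos hg]
      have hinv' : ∀ c', List.count c' h + min (pvQuota t p c') (pvRank t p c' (k + 1))
          = pvQuota t p c' := by
        intro c'
        by_cases hcc : c' = c
        · rw [hcc, pv_rank_succ, if_neg hno]; exact hinv c
        · rw [pv_rank_succ, if_neg (hnotin c' hcc)]; exact hinv c'
      rw [if_pos hg, ih (k + 1) _ h (by omega) hinv', hr, List.append_assoc]
    · -- mismatch: k is in occ c
      have hkocc : k ∈ pvOcc t p c := by
        rw [pv_mem_occ' t p c k]
        exact ⟨by omega, hc ▸ hg, hc.symm⟩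
      have hmem_iff : (c ∈ h) ↔ pvRank t p c k < pvQuota t p c := by
        have := hinv c
        constructor
        · intro hm
          have : 0 < h.count c := List.count_pos_iff.mpr hm
          omega
        · intro hlt
          have hmin : min (pvQuota t p c) (pvRank t p c k) = pvRank t p c k := by omega
          have hcnt : 0 < h.count c := by omega
          exact List.count_pos_iff.mp hcnt
      rw [if_neg hg]
      by_cases hy : c ∈ h
      · have hylt : pvRank t p c k < pvQuota t p c := hmem_iff.mp hy
        have hr : pvRender t p k = bold_colored_letter_port [c] pvYELLOW := by
          unfold pvRender
          rw [← hc, if_neg hg, if_pos hylt]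
        have hinv' : ∀ c', List.count c' (h.erase c)
            + min (pvQuota t p c') (pvRank t p c' (k + 1)) = pvQuota t p c' := by
          intro c'
          by_cases hcc : c' = c
          · rw [hcc, pv_rank_succ, if_pos hkocc, List.count_erase_self]
            have := hinv c
            have h1 : 1 ≤ h.count c := List.count_pos_iff.mpr hy
            omega
          · rw [pv_rank_succ, if_neg (hnotin c' hcc),
                List.count_erase_of_ne (fun e => hcc e)]
            exact hinv c'
        rw [if_pos hy, ih (k + 1) _ _ (by omega) hinv', hr, List.append_assoc]
      · have hyge : ¬ pvRank t p c k < pvQuota t p c := fun hlt => hy (hmem_iff.mpr hlt)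
        have hr : pvRender t p k = bold_colored_letter_port [c] pvGRAY := by
          unfold pvRender
          rw [← hc, if_neg hg, if_neg hyge]
        have hinv' : ∀ c', List.count c' h
            + min (pvQuota t p c') (pvRank t p c' (k + 1)) = pvQuota t p c' := by
          intro c'
          by_cases hcc : c' = c
          · rw [hcc, pv_rank_succ, if_pos hkocc]
            have := hinv c
            omega
          · rw [pv_rank_succ, if_neg (hnotin c' hcc)]
            exact hinv c'
        rw [if_neg hy, ih (k + 1) _ _ (by omega) hinv', hr, List.append_assoc]

lemma pv_A_eq (text pattern : String) :
    color_code_hints text pattern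
      = String.ofList ((List.range pattern.toList.length).flatMap
          (pvRender text.toList pattern.toList)) := by
  unfold color_code_hints
  refine congrArg String.ofList ?_
  set t := text.toList with ht
  set p := pattern.toList with hp
  set hidden := (List.range p.length).foldl
      (fun h i => if t.getD i ' ' ≠ p.getD i ' ' then h ++ [p.getD i ' '] else h) ([] : List Char)
    with hh
  have hinv0 : ∀ c, hidden.count c + min (pvQuota t p c) (pvRank t p c 0) = pvQuota t p c := by
    intro c
    have hr0 : pvRank t p c 0 = 0 := by unfold pvRank; simp
    rw [hh, pv_hidden_count, hr0]
    simp
  rw [List.range_eq_range', pv_A_loop t p p.length 0 [] hidden (by omega) hinv0,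
      ← List.range_eq_range', List.nil_append]

-- ============ B side ============

-- grouping loop: the dict maps each letter to its mismatch positions in order
lemma pv_occ_getD (t : List Char) (l : List Nat) (d : PySem.Dict Char (List Nat)) (c : Char) :
    ((l.foldl
        (fun d i => d.insert (t.getD i ' ') (d.getD (t.getD i ' ') [] ++ [i])) d).getD c [])
      = d.getD c [] ++ l.filter (fun i => t.getD i ' ' = c) := by
  induction l generalizing d with
  | nil => simp
  | cons i l ih =>
    simp only [List.foldl_cons, List.filter_cons]
    by_cases hic : t.getD i ' ' = c
    · rw [ih, PySem.Dict.getD_insert, if_pos hic.symm, hic,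
          if_pos (by simp [hic])]
      simp
    · rw [ih, PySem.Dict.getD_insert, if_neg (fun e => hic e.symm),
          if_neg (by simpa using hic)]

-- counting loop: the dict counts the unmatched pattern letters
lemma pv_quota_getD (p : List Char) (l : List Nat) (d : PySem.Dict Char Int) (c : Char) :
    ((l.foldl
        (fun d i => d.insert (p.getD i ' ') (d.getD (p.getD i ' ') 0 + 1)) d).getD c 0)
      = d.getD c 0 + ((l.filter (fun i => p.getD i ' ' = c)).length : Int) := by
  induction l generalizing d with
  | nil => simp
  | cons i l ih =>
    simp only [List.foldl_cons, List.filter_cons]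
    by_cases hic : p.getD i ' ' = c
    · rw [ih, PySem.Dict.getD_insert, if_pos hic.symm, hic,
          if_pos (by simp [hic])]
      simp
      omega
    · rw [ih, PySem.Dict.getD_insert, if_neg (fun e => hic e.symm),
          if_neg (by simpa using hic)]

-- membership in the first k elements of a strictly increasing list = rank below k
lemma pv_mem_take_sorted (l : List Nat) (hs : l.Pairwise (· < ·)) (i : Nat) (hi : i ∈ l) (k : Nat) :
    i ∈ l.take k ↔ (l.filter (fun j => j < i)).length < k := by
  induction l generalizing k with
  | nil => cases hi
  | cons a l ih =>
    rcases List.pairwise_cons.mp hs with ⟨hal, hl⟩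
    rcases List.mem_cons.mp hi with hia | hil
    · subst hia
      have : l.filter (fun j => j < i) = [] := by
        apply List.filter_eq_nil_iff.mpr
        intro j hj
        have := hal j hj
        simp
        omega
      cases k with
      | zero => simp
      | succ k => simp [this]
    · have hai : a < i := hal i hil
      cases k with
      | zero => simp
      | succ k =>
        have hne : i ≠ a := by omega
        rw [List.take_succ_cons, List.filter_cons]
        simp only [hai, decide_true, if_true]
        rw [List.mem_cons]
        simp only [hne, false_or]
        rw [ih hl hil k, List.length_cons]
        omega

lemma pv_sorted_occ (t p : List Char) (c : Char) : (pvOcc t p c).Pairwise (· < ·) := by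
  unfold pvOcc pvMisses
  exact (List.pairwise_lt_range.filter _).filter _

-- rendering through any yellow-position list with the rank/quota membership law gives pvRender
lemma pv_B_flatmap (t p : List Char) (Y : List Nat)
    (hY : ∀ i ∈ pvMisses t p,
      (i ∈ Y ↔ pvRank t p (t.getD i ' ') i < pvQuota t p (t.getD i ' '))) :
    (List.range p.length).flatMap (fun i =>
        bold_colored_letter_port [t.getD i ' ']
          (if t.getD i ' ' = p.getD i ' ' then pvGREEN
           else if i ∈ Y then pvYELLOW else pvGRAY))
      = (List.range p.length).flatMap (pvRender t p) := by
  apply List.flatMap_congr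
  intro i hir
  by_cases hg : t.getD i ' ' = p.getD i ' '
  · unfold pvRender
    rw [if_pos hg, if_pos hg]
  · have hi : i ∈ pvMisses t p := by
      unfold pvMisses
      exact List.mem_filter.mpr ⟨hir, by simpa using hg⟩
    unfold pvRender
    rw [if_neg hg, if_neg hg, if_congr (hY i hi) rfl rfl]

-- B's yellow set holds exactly the mismatch positions of rank below quota
lemma pv_B_yellow (t p : List Char) :
    ∀ i ∈ pvMisses t p,
      (i ∈ PySem.Set.ofList
          ((((pvMisses t p).foldl
              (fun (d : PySem.Dict Char (List Nat)) i =>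
                d.insert (t.getD i ' ') (d.getD (t.getD i ' ') [] ++ [i]))
              PySem.Dict.empty).items).flatMap
            (fun ci => ci.2.take
              ((((pvMisses t p).foldl
                  (fun (d : PySem.Dict Char Int) i =>
                    d.insert (p.getD i ' ') (d.getD (p.getD i ' ') 0 + 1))
                  PySem.Dict.empty).getD ci.1 0).toNat)))
        ↔ pvRank t p (t.getD i ' ') i < pvQuota t p (t.getD i ' ')) := by
  intro i hi
  set occ : PySem.Dict Char (List Nat) :=
    (pvMisses t p).foldl
      (fun (d : PySem.Dict Char (List Nat)) i => d.insert (t.getD i ' ') (d.getD (t.getD i ' ') [] ++ [i])) PySem.Dict.empty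
    with hocc
  set quota : PySem.Dict Char Int :=
    (pvMisses t p).foldl
      (fun (d : PySem.Dict Char Int) i => d.insert (p.getD i ' ') (d.getD (p.getD i ' ') 0 + 1)) PySem.Dict.empty
    with hquota
  have hoccD : ∀ c, occ.getD c [] = pvOcc t p c := by
    intro c
    rw [hocc, pv_occ_getD]
    simp [pvOcc]
  have hquotaD : ∀ c, quota.getD c 0 = (pvQuota t p c : Int) := by
    intro c
    rw [hquota, pv_quota_getD]
    simp [pvQuota]
  have hnodup : occ.keys.Nodup := by
    rw [hocc]
    exact PySem.Dict.nodup_keys_foldl_insert_key (pvMisses t p) (fun i => t.getD i ' ') _ _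
      PySem.Dict.nodup_keys_empty
  have hiocc : i ∈ pvOcc t p (t.getD i ' ') := by
    rw [pv_mem_occ]
    have h1 := List.mem_filter.mp hi
    simp only [List.mem_range] at h1
    exact ⟨h1.1, by simpa using h1.2⟩
  rw [PySem.Set.mem_ofList, List.mem_flatMap]
  constructor
  · rintro ⟨⟨c, v⟩, hmemit, hitake⟩
    have hv : occ.getD c [] = v :=
      PySem.Dict.getD_of_mem_items occ hmemit hnodup []
    rw [← hv, hoccD] at hitake
    have hiv : i ∈ pvOcc t p c := List.mem_of_mem_take hitake
    have hc : t.getD i ' ' = c := ((pv_mem_occ' t p c i).mp hiv).2.2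
    subst hc
    rw [hquotaD] at hitake
    have := (pv_mem_take_sorted _ (pv_sorted_occ t p _) i hiocc _).mp hitake
    simpa [pvRank] using this
  · intro hrk
    have hkey : (t.getD i ' ') ∈ occ.keys := by
      rw [hocc, PySem.Dict.keys_foldl_insert_key]
      refine (PySem.Set.mem_update _ _ _).mpr (Or.inr ?_)
      exact List.mem_map.mpr ⟨i, hi, rfl⟩
    refine ⟨(t.getD i ' ', occ.getD (t.getD i ' ') []), ?_, ?_⟩
    · rw [PySem.Dict.items_eq_map_keys occ hnodup []]
      exact List.mem_map.mpr ⟨t.getD i ' ', hkey, rfl⟩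
    · simp only [hoccD, hquotaD]
      rw [Int.toNat_natCast,
          pv_mem_take_sorted _ (pv_sorted_occ t p _) i hiocc]
      simpa [pvRank] using hrk

lemma pv_B_eq (text pattern : String) :
    color_code_hints_alt text pattern
      = String.ofList ((List.range pattern.toList.length).flatMap
          (pvRender text.toList pattern.toList)) := by
  unfold color_code_hints_alt
  exact congrArg String.ofList
    (pv_B_flatmap text.toList pattern.toList _ (pv_B_yellow text.toList pattern.toList))

-- ===== VERDICT (by name: the statement is the Claim_ definition above) =====
theorem color_code_hints_spec : Claim_equal_color_code_hints := by
  intro text pattern _ _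
  unfold Spec_color_code_hints
  rw [pv_A_eq, pv_B_eq]
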